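-- pv_equiv track=rewrite | github.com/Joe-McCann/College-Class-Code | CS100-RoadMap to CS Python/vowelDictionary.py | vowelDict
-- ===== SOURCE A (Python) =====
-- def vowelDict(text):
--     text = text.lower()
--     words = text.split()
--     vowels = "aeiou"
--     dic = {}
--     for vowel in vowels:
--         lst = []
--         for word in words:
--             if vowel in word:
--                 lst.append(word)
--         dic[vowel] = set(lst)
--     return dic
-- ===== SOURCE B (Python) =====
-- def vowelDict(text):
--     dic = {v: set() for v in "aeiou"}
--     for word in text.lower().split():
--         for ch in word:
--             if ch in dic:
--                 dic[ch].add(word)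
--     return dic
-- ===== Notes on version B (the rewrite author's own statement) =====
-- stated objective: alternative
-- what changed: Replaces the vowel-outer/word-inner nested scan (one filtered list per vowel, then set()) with a pre-seeded dict of five empty sets populated in a single pass over the words, testing each character of a word against the dict keys.
import Mathlib
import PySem

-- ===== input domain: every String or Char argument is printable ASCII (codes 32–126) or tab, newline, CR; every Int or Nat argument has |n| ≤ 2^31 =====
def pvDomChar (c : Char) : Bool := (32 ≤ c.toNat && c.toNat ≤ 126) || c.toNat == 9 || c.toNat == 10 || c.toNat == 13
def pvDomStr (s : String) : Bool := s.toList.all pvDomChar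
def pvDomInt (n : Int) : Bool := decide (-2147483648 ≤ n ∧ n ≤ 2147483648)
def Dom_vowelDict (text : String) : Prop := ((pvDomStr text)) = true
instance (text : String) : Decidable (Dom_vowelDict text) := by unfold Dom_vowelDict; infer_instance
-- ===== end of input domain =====

-- B builds a pre-seeded dict of the five vowel sets in one pass over the words (per-character membership
-- test against the dict keys) instead of A's vowel-outer/word-inner nested scan; alternative decomposition.

-- ===== PORT A =====
def vowelDict (text : String) : List (String × List String) :=
  let text := PySem.Str.lower text
  let words := PySem.Str.split₀ text
  let vowels := "aeiou"
  (vowels.toList.foldl (fun dic vowel =>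
      let lst := words.foldl (fun lst word =>
        if PySem.Str.isIn (String.ofList [vowel]) word then lst ++ [word] else lst) ([] : List String)
      dic.insert (String.ofList [vowel]) (PySem.Set.ofList lst))
    (PySem.Dict.empty : PySem.Dict String (List String))).items

-- ===== PORT B =====
def vowelDict_alt (text : String) : List (String × List String) :=
  let dic := "aeiou".toList.foldl
    (fun d v => d.insert (String.ofList [v]) (PySem.Set.empty : List String))
    (PySem.Dict.empty : PySem.Dict String (List String))
  ((PySem.Str.split₀ (PySem.Str.lower text)).foldl (fun dic word =>
      word.toList.foldl (fun dic ch =>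
        if dic.contains (String.ofList [ch]) then
          dic.modify (String.ofList [ch]) [] (fun s => PySem.Set.add s word)
        else dic) dic) dic).items

-- ===== PRECONDITION & SPEC =====
def Spec_vowelDict (text : String) (out : List (String × List String)) : Prop := out = vowelDict_alt text
instance (text : String) (out : List (String × List String)) : Decidable (Spec_vowelDict text out) := by unfold Spec_vowelDict; infer_instance

-- ===== CLAIM (what is proved, stated in full; the proofs are below) =====
def Claim_equal_vowelDict : Prop := ∀ (text : String), Dom_vowelDict text → Spec_vowelDict text (vowelDict text)

-- ===== LEMMAS AND PROOFS =====

/-- the five-key dict state B's loop maintains -/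
def pvD5 (sa se si so su : List String) : PySem.Dict String (List String) :=
  PySem.Dict.mk [(String.ofList ['a'], sa), (String.ofList ['e'], se), (String.ofList ['i'], si),
                 (String.ofList ['o'], so), (String.ofList ['u'], su)]

/-- the set of words of `ws` containing character `v`, accumulated on `s` -/
def pvG (v : Char) (ws : List String) (s : List String) : List String :=
  ws.foldl (fun s w => if v ∈ w.toList then PySem.Set.add s w else s) s

lemma lit_eq_single (s : String) (ch : Char) : (s = String.ofList [ch]) ↔ s.toList = [ch] := by
  rw [← String.toList_inj]; simp

lemma isIn_single (v : Char) (w : String) :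
    PySem.Str.isIn (String.ofList [v]) w = true ↔ v ∈ w.toList := by
  rw [PySem.Str.isIn_iff_infix]
  constructor
  · intro h; exact h.subset (by simp)
  · intro hm
    obtain ⟨s, t, h⟩ := List.append_of_mem hm
    exact ⟨s, t, by simp [h]⟩

/-- A's per-vowel filtered list, passed through `set()`, is the conditional-add fold. -/
lemma A_col (v : Char) (ws : List String) :
    ∀ lst, PySem.Set.ofList (ws.foldl (fun l w =>
        if PySem.Str.isIn (String.ofList [v]) w then l ++ [w] else l) lst)
      = ws.foldl (fun s w => if v ∈ w.toList then PySem.Set.add s w else s) (PySem.Set.ofList lst) := by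
  induction ws with
  | nil => intro lst; simp [List.foldl]
  | cons w ws ih =>
    intro lst
    simp only [List.foldl]
    by_cases hm : v ∈ w.toList
    · rw [if_pos ((isIn_single v w).mpr hm), if_pos hm, ih, PySem.Set.ofList_append_singleton]
    · rw [if_neg (by rw [Bool.not_eq_true, ← Bool.not_eq_true']; simpa using (mt (isIn_single v w).mp hm)),
          if_neg hm, ih]

/-- one word of B's outer loop: the char loop adds the word to exactly the vowel slots it contains -/
lemma charfold (w : String) :
    ∀ (l : List Char) (sa se si so su : List String),
    l.foldl (fun dic ch =>
        if dic.contains (String.ofList [ch]) then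
          dic.modify (String.ofList [ch]) [] (fun s => PySem.Set.add s w)
        else dic) (pvD5 sa se si so su)
    = pvD5 (if 'a' ∈ l then PySem.Set.add sa w else sa)
           (if 'e' ∈ l then PySem.Set.add se w else se)
           (if 'i' ∈ l then PySem.Set.add si w else si)
           (if 'o' ∈ l then PySem.Set.add so w else so)
           (if 'u' ∈ l then PySem.Set.add su w else su) := by
  intro l
  induction l with
  | nil => intro sa se si so su; simp [List.foldl]
  | cons ch l ih =>
    intro sa se si so su
    simp only [List.foldl]
    by_cases ha : ch = 'a'
    · subst ha
      rw [show (if (pvD5 sa se si so su).contains (String.ofList ['a']) = true then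
            (pvD5 sa se si so su).modify (String.ofList ['a']) [] (fun s => PySem.Set.add s w)
          else pvD5 sa se si so su) = pvD5 (PySem.Set.add sa w) se si so su from by
        simp [pvD5, PySem.Dict.contains, PySem.Dict.modify, PySem.Dict.insert,
              PySem.Dict.getD, PySem.Dict.get?]]
      rw [ih]
      by_cases h1 : 'a' ∈ l <;> simp [h1]
    · by_cases he : ch = 'e'
      · subst he
        rw [show (if (pvD5 sa se si so su).contains (String.ofList ['e']) = true then
              (pvD5 sa se si so su).modify (String.ofList ['e']) [] (fun s => PySem.Set.add s w)
            else pvD5 sa se si so su) = pvD5 sa (PySem.Set.add se w) si so su from by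
          simp [pvD5, PySem.Dict.contains, PySem.Dict.modify, PySem.Dict.insert,
                PySem.Dict.getD, PySem.Dict.get?]]
        rw [ih]
        by_cases h1 : 'e' ∈ l <;> simp [h1]
      · by_cases hi : ch = 'i'
        · subst hi
          rw [show (if (pvD5 sa se si so su).contains (String.ofList ['i']) = true then
                (pvD5 sa se si so su).modify (String.ofList ['i']) [] (fun s => PySem.Set.add s w)
              else pvD5 sa se si so su) = pvD5 sa se (PySem.Set.add si w) so su from by
            simp [pvD5, PySem.Dict.contains, PySem.Dict.modify, PySem.Dict.insert,
                  PySem.Dict.getD, PySem.Dict.get?]]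
          rw [ih]
          by_cases h1 : 'i' ∈ l <;> simp [h1]
        · by_cases ho : ch = 'o'
          · subst ho
            rw [show (if (pvD5 sa se si so su).contains (String.ofList ['o']) = true then
                  (pvD5 sa se si so su).modify (String.ofList ['o']) [] (fun s => PySem.Set.add s w)
                else pvD5 sa se si so su) = pvD5 sa se si (PySem.Set.add so w) su from by
              simp [pvD5, PySem.Dict.contains, PySem.Dict.modify, PySem.Dict.insert,
                    PySem.Dict.getD, PySem.Dict.get?]]
            rw [ih]
            by_cases h1 : 'o' ∈ l <;> simp [h1]
          · by_cases hu : ch = 'u'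
            · subst hu
              rw [show (if (pvD5 sa se si so su).contains (String.ofList ['u']) = true then
                    (pvD5 sa se si so su).modify (String.ofList ['u']) [] (fun s => PySem.Set.add s w)
                  else pvD5 sa se si so su) = pvD5 sa se si so (PySem.Set.add su w) from by
                simp [pvD5, PySem.Dict.contains, PySem.Dict.modify, PySem.Dict.insert,
                      PySem.Dict.getD, PySem.Dict.get?]]
              rw [ih]
              by_cases h1 : 'u' ∈ l <;> simp [h1]
            · rw [show (if (pvD5 sa se si so su).contains (String.ofList [ch]) = true then
                    (pvD5 sa se si so su).modify (String.ofList [ch]) [] (fun s => PySem.Set.add s w)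
                  else pvD5 sa se si so su) = pvD5 sa se si so su from by
                simp [pvD5, PySem.Dict.contains, lit_eq_single,
                      Ne.symm ha, Ne.symm he, Ne.symm hi, Ne.symm ho, Ne.symm hu]]
              rw [ih]
              simp [List.mem_cons, Ne.symm ha, Ne.symm he, Ne.symm hi, Ne.symm ho, Ne.symm hu]

/-- B's whole word loop, on the five-slot state -/
lemma wordfold (ws : List String) :
    ∀ (sa se si so su : List String),
    ws.foldl (fun dic word =>
      word.toList.foldl (fun dic ch =>
        if dic.contains (String.ofList [ch]) then
          dic.modify (String.ofList [ch]) [] (fun s => PySem.Set.add s word)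
        else dic) dic) (pvD5 sa se si so su)
    = pvD5 (pvG 'a' ws sa) (pvG 'e' ws se) (pvG 'i' ws si) (pvG 'o' ws so) (pvG 'u' ws su) := by
  induction ws with
  | nil => intro sa se si so su; simp [List.foldl, pvG]
  | cons w ws ih =>
    intro sa se si so su
    simp only [List.foldl]
    rw [charfold, ih]
    simp only [pvG, List.foldl]

-- ===== VERDICT (by name: the statement is the Claim_ definition above) =====
theorem vowelDict_spec : Claim_equal_vowelDict := by
  intro text _
  unfold Spec_vowelDict vowelDict vowelDict_alt
  have ht : "aeiou".toList = ['a', 'e', 'i', 'o', 'u'] := by decide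
  simp only [ht, List.foldl]
  rw [show (((((PySem.Dict.empty : PySem.Dict String (List String)).insert
        (String.ofList ['a']) PySem.Set.empty).insert (String.ofList ['e']) PySem.Set.empty).insert
        (String.ofList ['i']) PySem.Set.empty).insert (String.ofList ['o']) PySem.Set.empty).insert
        (String.ofList ['u']) PySem.Set.empty = pvD5 [] [] [] [] [] from by
    simp [pvD5, PySem.Dict.insert, PySem.Dict.empty, PySem.Dict.contains, PySem.Set.empty]]
  rw [wordfold]
  simp only [A_col, PySem.Set.ofList_nil]
  simp [pvD5, PySem.Dict.insert, PySem.Dict.empty, PySem.Dict.contains, pvG]
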